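-- pv_equiv track=rewrite | github.com/khm1102/BOJ | 백준/Gold/2436. 공약수/공약수.py | solution
-- ===== SOURCE A (Python) =====
-- def uclid(a, b):
--     while a % b != 0:
--         a, b = b, a % b
--
--     if b == 1:
--         return True
--     else:
--         return False
--
-- def solution(N, M):
--     num = M // N  # 최소공배수를 최대공약수로 나눈 값의 약수를 구한다.
--     arr = []
--     # 빠른 약수 구하기(제곱수 일지라도 2개를 넣어준다. ex)9 => 1, 3, 3, 9)
--     for i in range(1, num + 1):
--         if i * i > num:
--             break
--
--         if num % i == 0:
--             arr.append(i)
--             arr.append(num // i)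
--
--     # 오름차순으로 정렬
--     arr.sort()
--
--     # 중간부터 양쪽으로 탐색하기 위해 인덱스 설정
--     i = len(arr) // 2 - 1
--     j = len(arr) // 2
--
--     # 서로소인 약수 구하기
--     while True:
--         # 만약 2개의 수가 서로소이면 탈출
--         if uclid(arr[j], arr[i]):
--             break
--
--         i -= 1
--         j += 1
--
--     return arr[i] * N, arr[j] * N
-- ===== SOURCE B (Python) =====
-- def gcd(a, b):
--     while b:
--         a, b = b, a % b
--     return a
--
-- def solution(N, M):
--     num = M // N
--     best = 0
--     i = 1
--     while i * i <= num:
--         if num % i == 0 and gcd(i, num // i) == 1: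
--             best = i
--         i += 1
--     return (best * N, (num // best) * N)
-- ===== Notes on version B (the rewrite author's own statement) =====
-- stated objective: simpler
-- what changed: A builds the full divisor list, sorts it and runs a center-out two-pointer scan with a hand-rolled Euclid test; B does a single upward scan i = 1..isqrt(num) keeping the last divisor i whose cofactor num//i is coprime to it, with no list, no sort and no second loop.
import Mathlib
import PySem

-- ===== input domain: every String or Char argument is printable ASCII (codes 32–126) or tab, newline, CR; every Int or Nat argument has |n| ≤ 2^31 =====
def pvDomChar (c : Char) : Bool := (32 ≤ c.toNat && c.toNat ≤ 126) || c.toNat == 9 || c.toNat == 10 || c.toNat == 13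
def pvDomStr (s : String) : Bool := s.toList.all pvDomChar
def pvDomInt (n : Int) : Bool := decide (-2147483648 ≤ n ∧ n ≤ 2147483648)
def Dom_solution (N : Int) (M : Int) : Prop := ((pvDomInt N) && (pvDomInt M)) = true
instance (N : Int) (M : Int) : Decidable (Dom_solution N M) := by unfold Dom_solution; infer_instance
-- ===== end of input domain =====

-- B replaces A's build-all-divisors + sort + center-out two-pointer by one upward scan keeping the
-- last divisor i ≤ √num whose cofactor is coprime; return value only, same on all inputs where A returns.

-- ===== PORT A =====
-- while a % b != 0: a, b = b, a % b; return b == 1   (fuel b.toNat+1 suffices: b strictly decreases)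
def uclidLoop : Nat → Int → Int → Int
  | 0, _, b => b
  | f+1, a, b => if PySem.Int.mod a b ≠ 0 then uclidLoop f b (PySem.Int.mod a b) else b

def uclid (a b : Int) : Bool := uclidLoop (b.toNat + 1) a b == 1

-- for i in range(1, num+1): if i*i > num: break; if num % i == 0: arr += [i, num//i]
def aDivLoop (num : Int) : Nat → Int → List Int → List Int
  | 0, _, arr => arr
  | f+1, i, arr =>
    if i * i > num then arr
    else if PySem.Int.mod num i = 0 then aDivLoop num f (i+1) (arr ++ [i, PySem.Int.floordiv num i])
    else aDivLoop num f (i+1) arr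

-- while True: if uclid(arr[j], arr[i]): break; i -= 1; j += 1   (fuel arr.length suffices on Pre_)
def aSearch (arr : List Int) : Nat → Int → Int → Int × Int
  | 0, i, j => (i, j)
  | f+1, i, j =>
    if uclid ((PySem.List.pyGet? arr j).getD 0) ((PySem.List.pyGet? arr i).getD 0) then (i, j)
    else aSearch arr f (i-1) (j+1)

def solution (N : Int) (M : Int) : Int × Int :=
  let num := PySem.Int.floordiv M N
  let arr := PySem.List.sorted (aDivLoop num num.toNat 1 []) (fun x => x) false
  let i0 := PySem.Int.floordiv (arr.length : Int) 2 - 1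
  let j0 := PySem.Int.floordiv (arr.length : Int) 2
  let ij := aSearch arr arr.length i0 j0
  (((PySem.List.pyGet? arr ij.1).getD 0) * N, ((PySem.List.pyGet? arr ij.2).getD 0) * N)

-- ===== PORT B =====
-- def gcd(a, b): while b: a, b = b, a % b; return a
def gcdLoop : Nat → Int → Int → Int
  | 0, a, _ => a
  | f+1, a, b => if b ≠ 0 then gcdLoop f b (PySem.Int.mod a b) else a

def bGcd (a b : Int) : Int := gcdLoop (b.toNat + 1) a b

-- while i*i <= num: if num % i == 0 and gcd(i, num//i) == 1: best = i; i += 1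
def bLoop (num : Int) : Nat → Int → Int → Int
  | 0, _, best => best
  | f+1, i, best =>
    if i * i ≤ num then
      bLoop num f (i+1) (if PySem.Int.mod num i = 0 ∧ bGcd i (PySem.Int.floordiv num i) = 1 then i else best)
    else best

def solution_alt (N : Int) (M : Int) : Int × Int :=
  let num := PySem.Int.floordiv M N
  let best := bLoop num (num.toNat + 1) 1 0
  (best * N, (PySem.Int.floordiv num best) * N)

-- ===== PRECONDITION & SPEC =====
-- A raises exactly when N = 0 (ZeroDivisionError) or M//N < 1 (empty divisor list → IndexError).
def Pre_solution (N : Int) (M : Int) : Prop := N ≠ 0 ∧ 1 ≤ PySem.Int.floordiv M N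
instance (N : Int) (M : Int) : Decidable (Pre_solution N M) := by unfold Pre_solution; infer_instance
def pvWitness_solution : Int × Int := (3, 12)

def Spec_solution (N : Int) (M : Int) (out : Int × Int) : Prop := out = solution_alt N M
instance (N : Int) (M : Int) (out : Int × Int) : Decidable (Spec_solution N M out) := by unfold Spec_solution; infer_instance

-- ===== CLAIM (what is proved, stated in full; the proofs are below) =====
def Claim_equal_solution : Prop := ∀ (N : Int) (M : Int), Dom_solution N M → Pre_solution N M → Spec_solution N M (solution N M)

-- ===== LEMMAS AND PROOFS =====

-- d is recorded when d ∣ n; the pair (d, n/d) breaks the search when gcd(d, n/d) = 1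
def divP (n d : Nat) : Bool := n % d == 0
def goodP (n d : Nat) : Bool := Nat.gcd d (n / d) == 1
-- the divisors of n that are ≤ √n, in increasing order
def Dasc (n : Nat) : List Nat := (List.range' 1 n.sqrt).filter (divP n)
-- what aDivLoop builds
def pairsL (n : Nat) : List Int := (Dasc n).flatMap (fun (d : Nat) => [(d : Int), ((n / d : Nat) : Int)])
-- the sorted divisor array
def Sarr (n : Nat) : List Int := (Dasc n).map (fun (d : Nat) => (d : Int)) ++ ((Dasc n).reverse.map (fun (d : Nat) => ((n / d : Nat) : Int)))

theorem uclid_eq (f : Nat) (a b : Int) (hb : 0 < b) (hf : b.toNat < f) :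
    uclidLoop f a b = (Int.gcd a b : Int) := by
  induction f generalizing a b with
  | zero => omega
  | succ f ih =>
    have hm : PySem.Int.mod a b = a % b := PySem.Int.mod_eq_emod_of_pos hb
    by_cases h : a % b = 0
    · have hdvd : b ∣ a := Int.dvd_of_emod_eq_zero h
      simp only [uclidLoop, hm, h, ne_eq, not_true_eq_false, if_false]
      have h1 : (Int.gcd a b : Int) ∣ b := Int.gcd_dvd_right a b
      have h2 : b ∣ (Int.gcd a b : Int) := by
        have hnat : b.natAbs ∣ Int.gcd a b :=
          Nat.dvd_gcd (Int.natAbs_dvd_natAbs.mpr hdvd) (dvd_refl _)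
        have h2' : (b.natAbs : Int) ∣ ((Int.gcd a b : Nat) : Int) :=
          Int.natCast_dvd_natCast.mpr hnat
        rwa [Int.natAbs_of_nonneg (le_of_lt hb)] at h2'
      exact Int.dvd_antisymm (le_of_lt hb) (Int.natCast_nonneg _) h2 h1
    · have hb2 : 0 < a % b :=
        lt_of_le_of_ne (Int.emod_nonneg a (ne_of_gt hb)) (Ne.symm h)
      have hlt : a % b < b := Int.emod_lt_of_pos a hb
      simp only [uclidLoop, hm, h, ne_eq, not_false_eq_true, if_true]
      have hfn : (a % b).toNat < f := by omega
      rw [ih b (a % b) hb2 hfn]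
      rw [Int.gcd_comm b (a % b), Int.gcd_emod]

theorem gcdLoop_eq (f : Nat) (a b : Int) (ha : 0 ≤ a) (hb : 0 ≤ b) (hf : b.toNat < f) :
    gcdLoop f a b = (Int.gcd a b : Int) := by
  induction f generalizing a b with
  | zero => omega
  | succ f ih =>
    by_cases h0 : b = 0
    · simp only [gcdLoop, h0, ne_eq, not_true_eq_false, if_false]
      rw [Int.gcd_zero_right, Int.natCast_natAbs, abs_of_nonneg ha]
    · have hbp : 0 < b := lt_of_le_of_ne hb (Ne.symm h0)
      have hm : PySem.Int.mod a b = a % b := PySem.Int.mod_eq_emod_of_pos hbp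
      have hlt : a % b < b := Int.emod_lt_of_pos a hbp
      have hnn : 0 ≤ a % b := Int.emod_nonneg a (ne_of_gt hbp)
      simp only [gcdLoop, h0, ne_eq, not_false_eq_true, if_true, hm]
      have hfn : (a % b).toNat < f := by omega
      rw [ih b (a % b) hb hnn hfn]
      rw [Int.gcd_comm b (a % b), Int.gcd_emod]

theorem aDivLoop_eq (n : Nat) (f i : Nat) (arr : List Int) (hi : 1 ≤ i) (hf : i + f = n + 1) :
    aDivLoop (n : Int) f (i : Int) arr
      = arr ++ ((List.range' i (n.sqrt + 1 - i)).filter (divP n)).flatMap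
          (fun (d : Nat) => [(d : Int), ((n / d : Nat) : Int)]) := by
  induction f generalizing i arr with
  | zero =>
    have hs : n.sqrt + 1 - i = 0 := by have := Nat.sqrt_le_self n; omega
    simp [aDivLoop, hs]
  | succ f ih =>
    have hmod : PySem.Int.mod (n : Int) (i : Int) = ((n % i : Nat) : Int) :=
      PySem.Int.mod_natCast n i
    have hdivc : PySem.Int.floordiv (n : Int) (i : Int) = ((n / i : Nat) : Int) :=
      PySem.Int.floordiv_natCast n i
    by_cases hc : i ≤ n.sqrt
    · have hle : (i : Int) * (i : Int) ≤ (n : Int) := by exact_mod_cast Nat.le_sqrt.mp hc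
      have hcount : n.sqrt + 1 - i = (n.sqrt - i) + 1 := by omega
      rw [hcount, List.range'_succ]
      have hcast : ((i : Int) + 1) = ((i + 1 : Nat) : Int) := by push_cast; ring
      by_cases hd : n % i = 0
      · simp only [aDivLoop, if_neg (not_lt.mpr hle), hmod, hdivc,
          if_pos (show ((n % i : Nat) : Int) = 0 by exact_mod_cast hd), hcast]
        rw [ih (i + 1) _ (by omega) (by omega),
          show n.sqrt + 1 - (i + 1) = n.sqrt - i from by omega]
        rw [List.filter_cons_of_pos (by simp [divP, hd])]
        simp
      · simp only [aDivLoop, if_neg (not_lt.mpr hle), hmod,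
          if_neg (show ¬ ((n % i : Nat) : Int) = 0 by exact_mod_cast hd), hcast]
        rw [ih (i + 1) _ (by omega) (by omega),
          show n.sqrt + 1 - (i + 1) = n.sqrt - i from by omega]
        rw [List.filter_cons_of_neg (by simp [divP, hd])]
    · have hgt : (n : Int) < (i : Int) * (i : Int) := by
        exact_mod_cast Nat.sqrt_lt.mp (by omega)
      have hs : n.sqrt + 1 - i = 0 := by omega
      simp [aDivLoop, hgt, hs]

theorem interleave_perm (n : Nat) (l : List Nat) :
    (l.map (fun (d : Nat) => (d : Int)) ++ (l.reverse.map (fun (d : Nat) => ((n / d : Nat) : Int)))).Perm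
      (l.flatMap (fun (d : Nat) => [(d : Int), ((n / d : Nat) : Int)])) := by
  induction l with
  | nil => simp
  | cons x l ih =>
    simp only [List.map_cons, List.reverse_cons, List.map_append, List.flatMap_cons,
      List.cons_append, List.map_cons, List.map_nil]
    refine List.Perm.cons _ ?_
    have h1 : (l.map (fun (d : Nat) => (d : Int)) ++
        (l.reverse.map (fun (d : Nat) => ((n / d : Nat) : Int)) ++ [((n / x : Nat) : Int)])).Perm
        (((n / x : Nat) : Int) :: (l.map (fun (d : Nat) => (d : Int)) ++
          l.reverse.map (fun (d : Nat) => ((n / d : Nat) : Int)))) := by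
      rw [← List.append_assoc]
      exact List.perm_append_singleton _ _
    exact h1.trans (List.Perm.cons _ ih)

theorem sorted_pairs (n : Nat) :
    PySem.List.sorted (pairsL n) (fun x => x) false = Sarr n := by
  apply PySem.List.sorted_id_eq_of_perm_of_pairwise
  · exact interleave_perm n (Dasc n)
  · have hmem : ∀ d ∈ Dasc n, 1 ≤ d ∧ d ≤ n.sqrt := by
      intro d hd
      rcases List.mem_filter.mp hd with ⟨hr, _⟩
      rcases List.mem_range'_1.mp hr with ⟨h1, h2⟩
      omega
    have hD : (Dasc n).Pairwise (· < ·) := List.Pairwise.filter _ (List.pairwise_lt_range')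
    rw [Sarr, List.pairwise_append]
    refine ⟨?_, ?_, ?_⟩
    · rw [List.pairwise_map]
      exact hD.imp (fun h => by exact_mod_cast Nat.le_of_lt h)
    · rw [List.pairwise_map, List.pairwise_reverse]
      refine List.Pairwise.imp_of_mem ?_ hD
      intro a b ha hb hab
      have h1 : 1 ≤ a := (hmem a ha).1
      have hdle : n / b ≤ n / a := Nat.div_le_div_left (Nat.le_of_lt hab) h1
      exact_mod_cast hdle
    · intro x hx y hy
      rcases List.mem_map.mp hx with ⟨d, hd, rfl⟩
      rcases List.mem_map.mp hy with ⟨e, he', rfl⟩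
      have he : e ∈ Dasc n := List.mem_reverse.mp he'
      have hd1 := hmem d hd
      have he1 := hmem e he
      have hle : d ≤ n / e := by
        rw [Nat.le_div_iff_mul_le he1.1]
        calc d * e ≤ n.sqrt * n.sqrt := Nat.mul_le_mul hd1.2 he1.2
          _ ≤ n := Nat.sqrt_le n
      exact_mod_cast hle

theorem find?_filter_eq {α : Type} (l : List α) (p q : α → Bool) :
    (l.filter p).find? q = l.find? (fun a => p a && q a) := by
  induction l with
  | nil => simp
  | cons x l ih =>
    by_cases hp : p x <;> by_cases hq : q x <;>
      simp [hp, hq, ih]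

theorem bLoop_eq (n : Nat) (f i : Nat) (best : Int) (hi : 1 ≤ i) (hf : i + f = n + 2) :
    bLoop (n : Int) f (i : Int) best
      = match ((List.range' i (n.sqrt + 1 - i)).reverse).find? (fun d => divP n d && goodP n d) with
        | some d => (d : Int)
        | none => best := by
  induction f generalizing i best with
  | zero =>
    have hs : n.sqrt + 1 - i = 0 := by have := Nat.sqrt_le_self n; omega
    simp [bLoop, hs]
  | succ f ih =>
    have hmod : PySem.Int.mod (n : Int) (i : Int) = ((n % i : Nat) : Int) :=
      PySem.Int.mod_natCast n i
    have hdivc : PySem.Int.floordiv (n : Int) (i : Int) = ((n / i : Nat) : Int) :=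
      PySem.Int.floordiv_natCast n i
    by_cases hc : i ≤ n.sqrt
    · have hle : (i : Int) * (i : Int) ≤ (n : Int) := by exact_mod_cast Nat.le_sqrt.mp hc
      have hcount : n.sqrt + 1 - i = (n.sqrt - i) + 1 := by omega
      have hcast : ((i : Int) + 1) = ((i + 1 : Nat) : Int) := by push_cast; ring
      have hcond : (PySem.Int.mod (n : Int) (i : Int) = 0 ∧
          bGcd (i : Int) (PySem.Int.floordiv (n : Int) (i : Int)) = 1)
          ↔ (divP n i && goodP n i) = true := by
        rw [hmod, hdivc]
        unfold bGcd
        rw [gcdLoop_eq _ _ _ (by positivity) (by positivity) (by omega)]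
        rw [Int.gcd_natCast_natCast]
        simp only [divP, goodP, Bool.and_eq_true, beq_iff_eq]
        constructor
        · rintro ⟨h1, h2⟩; exact ⟨by exact_mod_cast h1, by exact_mod_cast h2⟩
        · rintro ⟨h1, h2⟩; exact ⟨by exact_mod_cast h1, by exact_mod_cast h2⟩
      rw [hcount, List.range'_succ, List.reverse_cons, List.find?_append]
      simp only [bLoop, if_pos hle, hcast]
      rw [ih (i + 1) _ (by omega) (by omega),
        show n.sqrt + 1 - (i + 1) = n.sqrt - i from by omega]
      cases h : (List.range' (i + 1) (n.sqrt - i)).reverse.find? (fun d => divP n d && goodP n d) with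
      | some d => simp [h]
      | none =>
        simp only [h, Option.none_or]
        by_cases hpi : (divP n i && goodP n i) = true
        · rw [if_pos (hcond.mpr hpi)]
          simp [h, List.find?, hpi]
        · rw [if_neg (fun hh => hpi (hcond.mp hh))]
          simp [h, List.find?, hpi]
    · have hgt : (n : Int) < (i : Int) * (i : Int) := by
        exact_mod_cast Nat.sqrt_lt.mp (by omega)
      have hs : n.sqrt + 1 - i = 0 := by omega
      simp [bLoop, hs, not_le.mpr hgt]

theorem aSearch_res (n : Nat) (f u : Nat) (d : Nat)
    (hu : u < (Dasc n).length) (hf : (Dasc n).length - u ≤ f)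
    (hfind : ((Dasc n).reverse.drop u).find? (goodP n) = some d) :
    ((PySem.List.pyGet? (Sarr n) (aSearch (Sarr n) f (((Dasc n).length : Int) - 1 - (u : Int)) (((Dasc n).length : Int) + (u : Int))).1).getD 0,
     (PySem.List.pyGet? (Sarr n) (aSearch (Sarr n) f (((Dasc n).length : Int) - 1 - (u : Int)) (((Dasc n).length : Int) + (u : Int))).2).getD 0)
      = ((d : Int), ((n / d : Nat) : Int)) := by
  induction f generalizing u d with
  | zero => omega
  | succ f ih =>
    have hu' : u < (Dasc n).reverse.length := by simpa using hu
    have hd0lt : (Dasc n).length - 1 - u < (Dasc n).length := by omega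
    have hd0 : (Dasc n).reverse[u]'hu' = (Dasc n)[(Dasc n).length - 1 - u]'hd0lt :=
      List.getElem_reverse hu'
    have hdrop : (Dasc n).reverse.drop u
        = (Dasc n).reverse[u]'hu' :: (Dasc n).reverse.drop (u + 1) :=
      List.drop_eq_getElem_cons hu'
    have hd0mem : (Dasc n).reverse[u]'hu' ∈ Dasc n := by
      rw [hd0]; exact List.getElem_mem _
    have hd0b : 1 ≤ (Dasc n).reverse[u]'hu' ∧ (Dasc n).reverse[u]'hu' ≤ n.sqrt := by
      rcases List.mem_filter.mp hd0mem with ⟨hr, _⟩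
      rcases List.mem_range'_1.mp hr with ⟨h1, h2⟩
      omega
    have hSlen : (Sarr n).length = (Dasc n).length + (Dasc n).length := by simp [Sarr]
    have e1 : (((Dasc n).length : Int) - 1 - (u : Int))
        = (((Dasc n).length - 1 - u : Nat) : Int) := by omega
    have e2 : (((Dasc n).length : Int) + (u : Int))
        = (((Dasc n).length + u : Nat) : Int) := by omega
    have hDv : (Dasc n)[(Dasc n).length - 1 - u]? = some ((Dasc n).reverse[u]'hu') := by
      rw [List.getElem?_eq_getElem hd0lt]
      exact congrArg some hd0.symm
    have hRv : (Dasc n).reverse[u]? = some ((Dasc n).reverse[u]'hu') :=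
      List.getElem?_eq_getElem hu'
    have hgi : PySem.List.pyGet? (Sarr n) (((Dasc n).length : Int) - 1 - (u : Int))
        = some (((Dasc n).reverse[u]'hu' : Nat) : Int) := by
      rw [e1, PySem.List.pyGet?_natCast, Sarr,
        List.getElem?_append_left (by simp; omega), List.getElem?_map, hDv]
      rfl
    have hgj : PySem.List.pyGet? (Sarr n) (((Dasc n).length : Int) + (u : Int))
        = some ((n / ((Dasc n).reverse[u]'hu') : Nat) : Int) := by
      rw [e2, PySem.List.pyGet?_natCast, Sarr,
        List.getElem?_append_right (by simp), List.getElem?_map,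
        show (Dasc n).length + u - ((Dasc n).map (fun (d : Nat) => (d : Int))).length = u by
          simp, hRv]
      rfl
    have hucl : uclid ((n / ((Dasc n).reverse[u]'hu') : Nat) : Int) (((Dasc n).reverse[u]'hu' : Nat) : Int)
        = goodP n ((Dasc n).reverse[u]'hu') := by
      unfold uclid
      rw [uclid_eq _ _ _ (by exact_mod_cast hd0b.1) (by omega), Int.gcd_natCast_natCast,
        Nat.gcd_comm]
      by_cases hg : Nat.gcd ((Dasc n).reverse[u]'hu') (n / ((Dasc n).reverse[u]'hu')) = 1
      · simp [hg, goodP]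
      · simp only [goodP, beq_iff_eq, hg]
        have : ¬ ((Nat.gcd ((Dasc n).reverse[u]'hu') (n / ((Dasc n).reverse[u]'hu')) : Nat) : Int) = 1 := by
          exact_mod_cast hg
        simp [this, hg]
    rw [hdrop] at hfind
    simp only [aSearch]
    rw [hgi, hgj]
    simp only [Option.getD_some, hucl]
    by_cases hgood : goodP n ((Dasc n).reverse[u]'hu') = true
    · rw [List.find?_cons_of_pos hgood] at hfind
      have hdd : (Dasc n).reverse[u]'hu' = d := by
        exact Option.some.inj hfind
      rw [if_pos hgood]
      rw [hgi, hgj]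
      simp [hdd]
    · have hgb : goodP n ((Dasc n).reverse[u]'hu') = false := by
        cases hq : goodP n ((Dasc n).reverse[u]'hu') <;> simp_all
      have hgb' : goodP n ((Dasc n)[(Dasc n).length - 1 - u]'hd0lt) = false := hd0 ▸ hgb
      rw [List.find?_cons_of_neg (by simp [hgb, hgb'])] at hfind
      have hu1 : u + 1 < (Dasc n).length := by
        by_contra hle
        have hnil : (Dasc n).reverse.drop (u + 1) = [] :=
          List.drop_eq_nil_of_le (by simpa using (by omega : (Dasc n).length ≤ u + 1))
        rw [hnil] at hfind
        simp at hfind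
      rw [if_neg (by simp [hgb, hgb'])]
      have e3 : (((Dasc n).length : Int) - 1 - (u : Int) - 1)
          = (((Dasc n).length : Int) - 1 - ((u + 1 : Nat) : Int)) := by push_cast; ring
      have e4 : (((Dasc n).length : Int) + (u : Int) + 1)
          = (((Dasc n).length : Int) + ((u + 1 : Nat) : Int)) := by push_cast; ring
      rw [e3, e4]
      exact ih (u + 1) d hu1 (by omega) hfind

-- ===== VERDICT (by name: the statement is the Claim_ definition above) =====
theorem solution_spec : Claim_equal_solution := by
  unfold Claim_equal_solution
  intro N M hDom hPre
  obtain ⟨hN, hnum⟩ := hPre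
  unfold Spec_solution
  simp only [solution, solution_alt]
  obtain ⟨n, hn⟩ : ∃ n : Nat, PySem.Int.floordiv M N = (n : Int) :=
    ⟨(PySem.Int.floordiv M N).toNat, by omega⟩
  have hn1 : 1 ≤ n := by
    rw [hn] at hnum; exact_mod_cast hnum
  rw [hn]
  have htn : ((n : Int)).toNat = n := by omega
  rw [htn]
  have hone : ((1 : Int)) = ((1 : Nat) : Int) := by norm_num
  have harr : aDivLoop (n : Int) n 1 [] = pairsL n := by
    rw [hone, aDivLoop_eq n n 1 [] (le_refl 1) (by omega)]
    rw [show n.sqrt + 1 - 1 = n.sqrt from by omega]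
    simp [pairsL, Dasc]
  rw [harr, sorted_pairs n]
  have hSlen : (Sarr n).length = (Dasc n).length + (Dasc n).length := by simp [Sarr]
  have hfd2 : PySem.Int.floordiv (((Sarr n).length : Nat) : Int) 2 = ((Dasc n).length : Int) := by
    rw [hSlen, PySem.Int.floordiv_eq_ediv_of_pos (by norm_num)]
    omega
  rw [hfd2]
  have h1mem : 1 ∈ Dasc n := by
    rw [Dasc, List.mem_filter]
    refine ⟨?_, by simp [divP, Nat.mod_one]⟩
    rw [List.mem_range'_1]
    have := Nat.sqrt_pos.mpr (show 0 < n by omega)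
    omega
  have htpos : 1 ≤ (Dasc n).length := List.length_pos_of_mem h1mem
  have hgood1 : goodP n 1 = true := by simp [goodP]
  obtain ⟨d, hd⟩ : ∃ d, ((Dasc n).reverse).find? (goodP n) = some d := by
    rcases Option.isSome_iff_exists.mp
      (List.find?_isSome.mpr ⟨1, List.mem_reverse.mpr h1mem, hgood1⟩) with ⟨d, hdd⟩
    exact ⟨d, hdd⟩
  have hA := aSearch_res n ((Sarr n).length) 0 d (by omega)
    (by rw [hSlen]; omega) (by simpa using hd)
  simp only [Nat.cast_zero, sub_zero, add_zero] at hA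
  have hB : bLoop (n : Int) (n + 1) 1 0 = (d : Int) := by
    rw [hone, bLoop_eq n (n + 1) 1 0 (le_refl 1) (by omega)]
    rw [show n.sqrt + 1 - 1 = n.sqrt from by omega]
    have hconn : ((List.range' 1 n.sqrt).reverse).find? (fun a => divP n a && goodP n a)
        = ((Dasc n).reverse).find? (goodP n) := by
      rw [Dasc, ← List.filter_reverse, find?_filter_eq]
    rw [hconn, hd]
  rw [hB]
  rw [PySem.Int.floordiv_natCast n d]
  have h1 := congrArg Prod.fst hA
  have h2 := congrArg Prod.snd hA
  simp only at h1 h2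
  rw [h1, h2]
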